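-- pv_equiv track=rewrite | github.com/bgabrovsek/knotpy | old/combinatorics.py | double_combinations_with_repetition
-- ===== SOURCE A (Python) =====
-- def double_combinations_with_repetition(elts, n):
--     comb = []
--     """ elts select range elements from [(data,x), (b,y), (c,z),...] where we can select n-times, but less than 2 times (update: less than 3 times)
--     example: elts = [(data,1), (b,2)], n = 2, should return: ab, bb -> [(data,1),(b,1)], [(b,2)]
--     example: elts = A1,B2,C1,D2, should return [(A1,B1,C1),(A1,B1,D1),(A1,B2),(A1,C1,D1),(A1,D2),(B1,C1,D1),(B1,D2),(B2,C2),(B2,D1),(C1,D2)]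
--     """
--     if n == 0: return [[]]
--     for i, (e, m) in enumerate(elts):
--         # select one element
--         for c in double_combinations_with_repetition(elts[i+1:],n-1):
--             comb.append([(e,1)] + c)
--         # select two elements
--         if n >= 2 and m >= 2:
--             for c in double_combinations_with_repetition(elts[i + 1:], n - 2):
--                 comb.append([(e, 2)] + c)
--         if n >= 3 and m >= 3:
--             for c in double_combinations_with_repetition(elts[i + 1:], n - 3):
--                 comb.append([(e, 3)] + c)
--
--
--
--     return comb
-- ===== SOURCE B (Python) =====
-- def double_combinations_with_repetition(elts, n):
--     """Include/exclude dynamic programming memoized by (suffix start index,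
--     remaining n): each distinct subproblem is computed once, and no inner
--     scan over positions is needed."""
--     memo = {}
--     L = len(elts)
--
--     def solve(i, k):
--         if k == 0:
--             return [[]]
--         if i >= L:
--             return []
--         key = (i, k)
--         if key in memo:
--             return memo[key]
--         e, m = elts[i]
--         res = [[(e, 1)] + c for c in solve(i + 1, k - 1)]
--         if k >= 2 and m >= 2:
--             res += [[(e, 2)] + c for c in solve(i + 1, k - 2)]
--         if k >= 3 and m >= 3:
--             res += [[(e, 3)] + c for c in solve(i + 1, k - 3)]
--         res += solve(i + 1, k)
--         memo[key] = res
--         return res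
--
--     return solve(0, n)
-- ===== Notes on version B (the rewrite author's own statement) =====
-- stated objective: alternative
-- what changed: Replaces A's plain recursion on list slices with include/exclude dynamic programming: results are memoized in a dict keyed by (suffix start index, remaining n) and suffixes are addressed by index instead of slicing, so each distinct subproblem is enumerated once.
import Mathlib
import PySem

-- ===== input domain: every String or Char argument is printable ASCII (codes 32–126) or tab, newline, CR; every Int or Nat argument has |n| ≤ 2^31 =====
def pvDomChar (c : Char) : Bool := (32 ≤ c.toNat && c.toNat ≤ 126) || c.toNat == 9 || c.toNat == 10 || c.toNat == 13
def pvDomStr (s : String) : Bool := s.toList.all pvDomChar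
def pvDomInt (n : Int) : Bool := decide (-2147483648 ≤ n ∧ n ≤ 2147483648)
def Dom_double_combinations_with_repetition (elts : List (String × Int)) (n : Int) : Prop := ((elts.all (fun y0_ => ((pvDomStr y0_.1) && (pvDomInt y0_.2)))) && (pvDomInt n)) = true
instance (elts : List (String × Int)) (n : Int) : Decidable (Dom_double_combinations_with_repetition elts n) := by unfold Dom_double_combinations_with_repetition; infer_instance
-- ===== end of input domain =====

-- B replaces A's plain recursion on list slices by include/exclude dynamic programming
-- memoized by (suffix start index, remaining n), so each distinct subproblem is
-- enumerated once (objective: alternative).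

-- ===== PORT A =====
-- dcwrLoopA is the body of A for n ≠ 0: the 'for i, (e, m) in enumerate(elts)' loop
-- written as structural recursion on the list (at loop position i the slice elts[i+1:]
-- is exactly the tail 'rest'); each recursive call double_combinations_with_repetition(elts[i+1:], k)
-- appears as its one-step unfolding 'if k = 0 then [[]] else dcwrLoopA rest k'.
def dcwrLoopA : List (String × Int) → Int → List (List (String × Int))
  | [], _ => []
  | (e, m) :: rest, n =>
    ((if n - 1 = 0 then [[]] else dcwrLoopA rest (n - 1)).map (fun c => (e, 1) :: c))
    ++ (if n ≥ 2 ∧ m ≥ 2 then (if n - 2 = 0 then [[]] else dcwrLoopA rest (n - 2)).map (fun c => (e, 2) :: c) else [])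
    ++ (if n ≥ 3 ∧ m ≥ 3 then (if n - 3 = 0 then [[]] else dcwrLoopA rest (n - 3)).map (fun c => (e, 3) :: c) else [])
    ++ dcwrLoopA rest n

def double_combinations_with_repetition (elts : List (String × Int)) (n : Int) : List (List (String × Int)) :=
  if n = 0 then [[]] else dcwrLoopA elts n

-- ===== PORT B =====
-- Transliteration of Source B: solve(i, k) with the memo dict threaded through;
-- elts[i] (always in range when read) is elts.getD i.  The extra structural 'fuel'
-- parameter (called with more than the maximal recursion depth L + 1) only makes
-- the recursion total; the fuel = 0 branch is never reached.
def dcwrSolveB (elts : List (String × Int)) (L : Nat) :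
    Nat → Nat → Int →
    PySem.Dict (Nat × Int) (List (List (String × Int))) →
    List (List (String × Int)) × PySem.Dict (Nat × Int) (List (List (String × Int)))
  | 0, _, _, memo => ([], memo)
  | fuel + 1, i, k, memo =>
    if k = 0 then ([[]], memo)
    else if L ≤ i then ([], memo)
    else
      match memo.get? (i, k) with
      | some v => (v, memo)
      | none =>
        let em := elts.getD i ("", 0)
        let r1 := dcwrSolveB elts L fuel (i + 1) (k - 1) memo
        let s1 := (r1.1.map (fun c => (em.1, 1) :: c), r1.2)
        let s2 :=
          if k ≥ 2 ∧ em.2 ≥ 2 then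
            let r2 := dcwrSolveB elts L fuel (i + 1) (k - 2) s1.2
            (s1.1 ++ r2.1.map (fun c => (em.1, 2) :: c), r2.2)
          else s1
        let s3 :=
          if k ≥ 3 ∧ em.2 ≥ 3 then
            let r3 := dcwrSolveB elts L fuel (i + 1) (k - 3) s2.2
            (s2.1 ++ r3.1.map (fun c => (em.1, 3) :: c), r3.2)
          else s2
        let r4 := dcwrSolveB elts L fuel (i + 1) k s3.2
        let res := s3.1 ++ r4.1
        (res, r4.2.insert (i, k) res)
termination_by structural fuel => fuel

def double_combinations_with_repetition_alt (elts : List (String × Int)) (n : Int) : List (List (String × Int)) :=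
  (dcwrSolveB elts elts.length (elts.length + 1) 0 n PySem.Dict.empty).1

-- ===== PRECONDITION & SPEC =====
def Spec_double_combinations_with_repetition (elts : List (String × Int)) (n : Int) (out : List (List (String × Int))) : Prop := out = double_combinations_with_repetition_alt elts n
instance (elts : List (String × Int)) (n : Int) (out : List (List (String × Int))) : Decidable (Spec_double_combinations_with_repetition elts n out) := by unfold Spec_double_combinations_with_repetition; infer_instance

-- ===== CLAIM (what is proved, stated in full; the proofs are below) =====
def Claim_equal_double_combinations_with_repetition : Prop := ∀ (elts : List (String × Int)) (n : Int), Dom_double_combinations_with_repetition elts n → Spec_double_combinations_with_repetition elts n (double_combinations_with_repetition elts n)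

-- ===== LEMMAS AND PROOFS =====

-- A's recursive call written the way dcwrLoopA inlines it IS A.
lemma dcwr_unfold (elts : List (String × Int)) (k : Int) :
    double_combinations_with_repetition elts k
      = if k = 0 then [[]] else dcwrLoopA elts k := rfl

lemma dcwrLoopA_eq_of_ne (elts : List (String × Int)) (k : Int) (hk : k ≠ 0) :
    dcwrLoopA elts k = double_combinations_with_repetition elts k := by
  rw [dcwr_unfold, if_neg hk]

-- Invariant: every value stored in the memo is the answer A gives for that suffix.
def dcwrInv (elts : List (String × Int))
    (memo : PySem.Dict (Nat × Int) (List (List (String × Int)))) : Prop :=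
  ∀ i k v, memo.get? (i, k) = some v → v = double_combinations_with_repetition (elts.drop i) k

lemma dcwrInv_insert (elts : List (String × Int)) (i : Nat) (k : Int)
    (v : List (List (String × Int)))
    (memo : PySem.Dict (Nat × Int) (List (List (String × Int))))
    (hinv : dcwrInv elts memo)
    (hv : v = double_combinations_with_repetition (elts.drop i) k) :
    dcwrInv elts (memo.insert (i, k) v) := by
  intro i' k' w hw
  rw [PySem.Dict.get?_insert] at hw
  split at hw
  · rename_i heq
    obtain ⟨h1, h2⟩ := Prod.mk.injEq .. ▸ heq
    injection hw with hw
    subst h1; subst h2; subst hw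
    exact hv
  · exact hinv i' k' w hw

lemma dcwr_main (elts : List (String × Int)) (fuel : Nat) :
    ∀ i k memo, elts.length - i < fuel → dcwrInv elts memo →
      (dcwrSolveB elts elts.length fuel i k memo).1 = double_combinations_with_repetition (elts.drop i) k
      ∧ dcwrInv elts (dcwrSolveB elts elts.length fuel i k memo).2 := by
  induction fuel with
  | zero => intro i k memo hd; omega
  | succ d ih =>
    intro i k memo hd hinv
    rw [dcwrSolveB]
    by_cases hk : k = 0
    · subst hk
      rw [if_pos rfl, dcwr_unfold, if_pos rfl]
      exact ⟨rfl, hinv⟩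
    rw [if_neg hk]
    by_cases hLi : elts.length ≤ i
    · rw [if_pos hLi, List.drop_eq_nil_of_le hLi, dcwr_unfold, if_neg hk]
      exact ⟨rfl, hinv⟩
    rw [if_neg hLi]
    have hi : i < elts.length := by omega
    have hstep : elts.length - (i + 1) < d := by omega
    cases hget : memo.get? (i, k) with
    | some v => exact ⟨hinv i k v hget, hinv⟩
    | none =>
      rcases hem : elts.getD i ("", 0) with ⟨e, m⟩
      have hdrop : elts.drop i = (e, m) :: elts.drop (i + 1) := by
        rw [List.drop_eq_getElem_cons hi, ← List.getD_eq_getElem elts ("", 0) hi, hem]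
      have hA : double_combinations_with_repetition (elts.drop i) k
          = (double_combinations_with_repetition (elts.drop (i+1)) (k-1)).map (fun c => (e, 1) :: c)
            ++ (if k ≥ 2 ∧ m ≥ 2 then (double_combinations_with_repetition (elts.drop (i+1)) (k-2)).map (fun c => (e, 2) :: c) else [])
            ++ (if k ≥ 3 ∧ m ≥ 3 then (double_combinations_with_repetition (elts.drop (i+1)) (k-3)).map (fun c => (e, 3) :: c) else [])
            ++ double_combinations_with_repetition (elts.drop (i+1)) k := by
        rw [dcwr_unfold, if_neg hk, hdrop, dcwrLoopA,
          dcwrLoopA_eq_of_ne _ _ hk, ← dcwr_unfold, ← dcwr_unfold, ← dcwr_unfold]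
      obtain ⟨h1, hinv1⟩ := ih (i + 1) (k - 1) memo hstep hinv
      simp only [hem]
      by_cases hc2 : k ≥ 2 ∧ m ≥ 2
      · simp only [if_pos hc2]
        obtain ⟨h2, hinv2⟩ := ih (i + 1) (k - 2) _ hstep hinv1
        by_cases hc3 : k ≥ 3 ∧ m ≥ 3
        · simp only [if_pos hc3]
          obtain ⟨h3, hinv3⟩ := ih (i + 1) (k - 3) _ hstep hinv2
          obtain ⟨h4, hinv4⟩ := ih (i + 1) k _ hstep hinv3
          refine ⟨?_, dcwrInv_insert elts i k _ _ hinv4 ?_⟩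
          all_goals rw [hA, if_pos hc2, if_pos hc3, ← h1, ← h2, ← h3, ← h4]
          all_goals simp [List.append_assoc]
        · simp only [if_neg hc3]
          obtain ⟨h4, hinv4⟩ := ih (i + 1) k _ hstep hinv2
          refine ⟨?_, dcwrInv_insert elts i k _ _ hinv4 ?_⟩
          all_goals rw [hA, if_pos hc2, if_neg hc3, ← h1, ← h2, ← h4]
          all_goals simp [List.append_assoc]
      · simp only [if_neg hc2]
        by_cases hc3 : k ≥ 3 ∧ m ≥ 3
        · simp only [if_pos hc3]
          obtain ⟨h3, hinv3⟩ := ih (i + 1) (k - 3) _ hstep hinv1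
          obtain ⟨h4, hinv4⟩ := ih (i + 1) k _ hstep hinv3
          refine ⟨?_, dcwrInv_insert elts i k _ _ hinv4 ?_⟩
          all_goals rw [hA, if_neg hc2, if_pos hc3, ← h1, ← h3, ← h4]
          all_goals simp [List.append_assoc]
        · simp only [if_neg hc3]
          obtain ⟨h4, hinv4⟩ := ih (i + 1) k _ hstep hinv1
          refine ⟨?_, dcwrInv_insert elts i k _ _ hinv4 ?_⟩
          all_goals rw [hA, if_neg hc2, if_neg hc3, ← h1, ← h4]
          all_goals simp [List.append_assoc]

-- ===== VERDICT (by name: the statement is the Claim_ definition above) =====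
theorem double_combinations_with_repetition_spec : Claim_equal_double_combinations_with_repetition := by
  intro elts n _
  unfold Spec_double_combinations_with_repetition double_combinations_with_repetition_alt
  have h := dcwr_main elts (elts.length + 1) 0 n PySem.Dict.empty (by omega)
    (by intro i k v hv; simp [PySem.Dict.get?_empty] at hv)
  simpa using h.1.symm
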